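-- pv_equiv track=rewrite | github.com/thantrieu/Python2030 | net/braniumacademy/ex_chapter4/lesson43/Exercises9.py | draw_triangle
-- ===== SOURCE A (Python) =====
-- def draw_triangle(height):
--     triangle = []
--     for i in range(1, height + 1):
--         triangle.append([])
--         for j in range(1, 2 * height):
--             if height - i + 1 <= j <= height + i - 1:
--                 triangle[i - 1].append(f' {i - abs(height - j)} ')
--             else:
--                 triangle[i - 1].append('   ')
--     return triangle
-- ===== SOURCE B (Python) =====
-- def draw_triangle(height):
--     triangle = []
--     for i in range(1, height + 1):
--         pad = ['   '] * (height - i)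
--         asc = [f' {v} ' for v in range(1, i + 1)]
--         desc = [f' {v} ' for v in range(i - 1, 0, -1)]
--         triangle.append(pad + asc + desc + pad)
--     return triangle
-- ===== Notes on version B (the rewrite author's own statement) =====
-- stated objective: simpler
-- what changed: Each row is assembled by concatenating padding lists with an ascending and a descending run built directly from ranges, removing A's per-column membership test and abs call across the full row width.
import Mathlib
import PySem

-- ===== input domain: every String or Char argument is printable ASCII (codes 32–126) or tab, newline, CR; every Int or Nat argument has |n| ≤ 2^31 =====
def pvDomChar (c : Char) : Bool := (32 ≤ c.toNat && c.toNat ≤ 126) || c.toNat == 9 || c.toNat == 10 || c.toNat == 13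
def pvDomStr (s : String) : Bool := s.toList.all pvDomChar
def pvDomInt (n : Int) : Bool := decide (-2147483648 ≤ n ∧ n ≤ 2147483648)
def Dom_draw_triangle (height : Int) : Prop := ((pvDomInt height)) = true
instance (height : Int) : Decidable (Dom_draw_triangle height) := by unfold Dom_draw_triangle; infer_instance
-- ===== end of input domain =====

-- B builds each row by concatenating padding + ascending run + descending run + padding
-- instead of A's per-column membership test with abs per cell; same output, same asymptotic cost.

-- ===== PORT A =====
def draw_triangle (height : Int) : List (List String) :=
  (PySem.List.pyRange 1 (height + 1) 1).foldl (fun triangle i =>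
    triangle ++ [(PySem.List.pyRange 1 (2 * height) 1).foldl (fun row j =>
      row ++ [if height - i + 1 ≤ j ∧ j ≤ height + i - 1
              then " " ++ PySem.Int.toStr (i - |height - j|) ++ " "
              else "   "]) []]) []

-- ===== PORT B =====
def draw_triangle_alt (height : Int) : List (List String) :=
  (PySem.List.pyRange 1 (height + 1) 1).foldl (fun triangle i =>
    let pad := List.replicate (height - i).toNat "   "
    let asc := (PySem.List.pyRange 1 (i + 1) 1).map (fun v => " " ++ PySem.Int.toStr v ++ " ")
    let desc := (PySem.List.pyRange (i - 1) 0 (-1)).map (fun v => " " ++ PySem.Int.toStr v ++ " ")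
    triangle ++ [pad ++ asc ++ desc ++ pad]) []

-- ===== PRECONDITION & SPEC =====
def Spec_draw_triangle (height : Int) (out : List (List String)) : Prop := out = draw_triangle_alt height
instance (height : Int) (out : List (List String)) : Decidable (Spec_draw_triangle height out) := by unfold Spec_draw_triangle; infer_instance

-- ===== CLAIM (what is proved, stated in full; the proofs are below) =====
def Claim_equal_draw_triangle : Prop := ∀ (height : Int), Dom_draw_triangle height → Spec_draw_triangle height (draw_triangle height)

-- ===== LEMMAS AND PROOFS =====

-- A's row for 1 ≤ i ≤ height equals B's row.
lemma row_eq (h i : Int) (h1 : 1 ≤ i) (h2 : i ≤ h) :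
    (PySem.List.pyRange 1 (2 * h) 1).foldl (fun row j =>
      row ++ [if h - i + 1 ≤ j ∧ j ≤ h + i - 1
              then " " ++ PySem.Int.toStr (i - |h - j|) ++ " "
              else "   "]) []
    = List.replicate (h - i).toNat "   "
      ++ ((PySem.List.pyRange 1 (i + 1) 1).map (fun v => " " ++ PySem.Int.toStr v ++ " "))
      ++ ((PySem.List.pyRange (i - 1) 0 (-1)).map (fun v => " " ++ PySem.Int.toStr v ++ " "))
      ++ List.replicate (h - i).toNat "   " := by
  rw [PySem.List.foldl_append_singleton_eq_map, List.nil_append]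
  rw [PySem.List.pyRange_one_append 1 (h - i + 1) (2 * h) (by omega) (by omega),
      PySem.List.pyRange_one_append (h - i + 1) (h + 1) (2 * h) (by omega) (by omega),
      PySem.List.pyRange_one_append (h + 1) (h + i) (2 * h) (by omega) (by omega)]
  simp only [List.map_append, List.append_assoc]
  congr 1
  · -- left padding
    rw [List.map_congr_left (g := fun _ => "   ")
        (fun j hj => by
          rw [PySem.List.mem_pyRange_one] at hj
          rw [if_neg (by omega)])]
    rw [List.map_const', PySem.List.length_pyRange_one]
    congr 1; omega
  congr 1
  · -- ascending run
    rw [PySem.List.pyRange_one (h - i + 1) (h + 1), PySem.List.pyRange_one 1 (i + 1)]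
    have hlen : (h + 1 - (h - i + 1)).toNat = (i + 1 - 1).toNat := by omega
    rw [hlen, List.map_map, List.map_map]
    refine List.map_congr_left (fun k hk => ?_)
    rw [List.mem_range] at hk
    simp only [Function.comp]
    rw [if_pos (by constructor <;> omega)]
    have : i - |h - (h - i + 1 + (k : Int))| = 1 + (k : Int) := by
      rw [abs_of_nonneg (by omega)]; omega
    rw [this]
  congr 1
  · -- descending run
    rw [PySem.List.pyRange_one (h + 1) (h + i), PySem.List.pyRange_neg_one (i - 1) 0]
    have hlen : (h + i - (h + 1)).toNat = (i - 1 - 0).toNat := by omega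
    rw [hlen, List.map_map, List.map_map]
    refine List.map_congr_left (fun k hk => ?_)
    rw [List.mem_range] at hk
    simp only [Function.comp]
    rw [if_pos (by constructor <;> omega)]
    have : i - |h - (h + 1 + (k : Int))| = i - 1 - (k : Int) := by
      rw [abs_of_nonpos (by omega)]; omega
    rw [this]
  · -- right padding
    rw [List.map_congr_left (g := fun _ => "   ")
        (fun j hj => by
          rw [PySem.List.mem_pyRange_one] at hj
          rw [if_neg (by omega)])]
    rw [List.map_const', PySem.List.length_pyRange_one]
    congr 1; omega

-- ===== VERDICT (by name: the statement is the Claim_ definition above) =====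
theorem draw_triangle_spec : Claim_equal_draw_triangle := by
  intro height _
  unfold Spec_draw_triangle draw_triangle draw_triangle_alt
  apply PySem.List.foldl_congr_mem
  intro acc i hi
  rw [PySem.List.mem_pyRange_one] at hi
  dsimp only
  rw [row_eq height i hi.1 (by omega)]
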